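-- pv_equiv track=rewrite | github.com/stop16/DMU-RG-EXPO-2025 | Arduino/Merge/Merged_Type3/render_dotmatrix.py | render_columns
-- ===== SOURCE A (Python) =====
-- from typing import Dict, Iterable, List, Sequence
--
-- def render_columns(
--     columns: Sequence[int],
--     on_char: str = "#",
--     off_char: str = " ",
--     lsb_top: bool = False,
-- ) -> List[str]:
--     """Convert column data into ASCII rows."""
--     if any(val < 0 or val > 0xFFFF for val in columns):
--         raise ValueError("Column values must be 16-bit unsigned integers.")
--
--     bit_range: Iterable[int]
--     if lsb_top:
--         bit_range = range(16)
--     else: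
--         bit_range = range(15, -1, -1)
--
--     rows: List[str] = []
--     for bit in bit_range:
--         row = "".join(
--             on_char if (column >> bit) & 0x1 else off_char for column in columns
--         )
--         rows.append(row)
--     return rows
-- ===== SOURCE B (Python) =====
-- def render_columns(columns, on_char="#", off_char=" ", lsb_top=False):
--     """Convert column data into ASCII rows."""
--     if any(val < 0 or val > 0xFFFF for val in columns):
--         raise ValueError("Column values must be 16-bit unsigned integers.")
--     col_strings = [format(c, "016b") for c in columns]
--     idxs = range(15, -1, -1) if lsb_top else range(16)
--     return ["".join(on_char if s[i] == "1" else off_char for s in col_strings) for i in idxs]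
-- ===== Notes on version B (the rewrite author's own statement) =====
-- stated objective: idiomatic
-- what changed: B precomputes a per-column 16-char bit-string table (format(c,'016b')) once and reads each output row off that table by string index (a transpose), instead of re-shifting every column for every bit as A does.
import Mathlib
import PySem

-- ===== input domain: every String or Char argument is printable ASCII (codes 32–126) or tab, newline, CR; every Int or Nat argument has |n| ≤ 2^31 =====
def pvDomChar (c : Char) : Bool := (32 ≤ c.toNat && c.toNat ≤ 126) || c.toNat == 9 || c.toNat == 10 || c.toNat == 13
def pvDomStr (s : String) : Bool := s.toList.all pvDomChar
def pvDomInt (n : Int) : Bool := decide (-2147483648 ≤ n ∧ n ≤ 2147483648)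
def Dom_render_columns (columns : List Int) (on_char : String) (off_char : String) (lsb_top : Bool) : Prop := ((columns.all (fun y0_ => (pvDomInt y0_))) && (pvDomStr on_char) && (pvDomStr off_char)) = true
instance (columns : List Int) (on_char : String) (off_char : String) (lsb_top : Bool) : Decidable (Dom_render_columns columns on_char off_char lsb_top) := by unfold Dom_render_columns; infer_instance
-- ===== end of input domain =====

-- B replaces A's per-row bit shifting with a precomputed per-column '016b' bit-string table read off row-wise (transpose); objective: idiomatic. Equality of RETURN values on Pre_ (A raises ValueError outside Pre_).

-- ===== PORT A =====
-- `(column >> bit) & 1`: columns are nonnegative under Pre_, so `.toNat` shifting is exact there.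
def render_columns (columns : List Int) (on_char : String) (off_char : String) (lsb_top : Bool) : List String :=
  let bit_range : List Int := if lsb_top then PySem.List.pyRange 0 16 1 else PySem.List.pyRange 15 (-1) (-1)
  bit_range.foldl (fun rows bit =>
    rows ++ [String.join (columns.map (fun column =>
      if (column.toNat >>> bit.toNat) % 2 = 1 then on_char else off_char))]) []

-- ===== PORT B =====
-- format(c, "016b"): the 16 bits of c MSB-first; exact for 0 ≤ c ≤ 0xFFFF (guaranteed by Pre_).
def fmt016b (c : Int) : List Char :=
  (PySem.List.pyRange 15 (-1) (-1)).map (fun b => if (c.toNat >>> b.toNat) % 2 = 1 then '1' else '0')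

def render_columns_alt (columns : List Int) (on_char : String) (off_char : String) (lsb_top : Bool) : List String :=
  let col_strings : List (List Char) := columns.map fmt016b
  let idxs : List Int := if lsb_top then PySem.List.pyRange 15 (-1) (-1) else PySem.List.pyRange 0 16 1
  idxs.map (fun i => String.join (col_strings.map (fun s =>
    if PySem.List.pyGet? s i = some '1' then on_char else off_char)))

-- ===== PRECONDITION & SPEC =====
-- Pre_ excludes exactly the inputs where Python A raises ValueError (a column outside 0..0xFFFF).
def Pre_render_columns (columns : List Int) (on_char : String) (off_char : String) (lsb_top : Bool) : Prop :=
  ∀ c ∈ columns, 0 ≤ c ∧ c ≤ 65535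
instance (columns : List Int) (on_char : String) (off_char : String) (lsb_top : Bool) : Decidable (Pre_render_columns columns on_char off_char lsb_top) := by unfold Pre_render_columns; infer_instance
def pvWitness_render_columns : List Int × String × String × Bool := ([5, 65535, 0], "#", " ", false)

def Spec_render_columns (columns : List Int) (on_char : String) (off_char : String) (lsb_top : Bool) (out : List String) : Prop := out = render_columns_alt columns on_char off_char lsb_top
instance (columns : List Int) (on_char : String) (off_char : String) (lsb_top : Bool) (out : List String) : Decidable (Spec_render_columns columns on_char off_char lsb_top out) := by unfold Spec_render_columns; infer_instance

-- ===== CLAIM (what is proved, stated in full; the proofs are below) =====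
def Claim_equal_render_columns : Prop := ∀ (columns : List Int) (on_char : String) (off_char : String) (lsb_top : Bool), Dom_render_columns columns on_char off_char lsb_top → Pre_render_columns columns on_char off_char lsb_top → Spec_render_columns columns on_char off_char lsb_top (render_columns columns on_char off_char lsb_top)

-- ===== LEMMAS AND PROOFS =====

lemma foldl_app {α : Type} (f : Int → α) : ∀ (l : List Int) (init : List α),
    l.foldl (fun rows b => rows ++ [f b]) init = init ++ l.map f := by
  intro l
  induction l with
  | nil => simp
  | cons x xs ih => intro init; simp [List.foldl, ih]

lemma range_down : PySem.List.pyRange 15 (-1) (-1) = [15,14,13,12,11,10,9,8,7,6,5,4,3,2,1,0] := by decide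

-- the character B reads at string index i equals A's bit test at bit 15-i
lemma char_eq (c : Int) (on_char off_char : String) (i : Int) (hi : 0 ≤ i) (hi' : i < 16) :
    (if PySem.List.pyGet? (fmt016b c) i = some '1' then on_char else off_char)
      = (if (c.toNat >>> (15 - i).toNat) % 2 = 1 then on_char else off_char) := by
  have h1 : PySem.List.pyGet? (fmt016b c) i
      = some (if (c.toNat >>> (15 - i).toNat) % 2 = 1 then '1' else '0') := by
    obtain ⟨k, rfl, hk⟩ : ∃ k : Nat, i = (k : Int) ∧ k < 16 := ⟨i.toNat, by omega, by omega⟩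
    rw [PySem.List.pyGet?_natCast]
    simp only [fmt016b, range_down, List.map]
    interval_cases k <;> norm_num
  rw [h1]
  by_cases h : (c.toNat >>> (15 - i).toNat) % 2 = 1 <;> simp [h]

theorem render_columns_spec : Claim_equal_render_columns := by
  intro columns on_char off_char lsb_top _ _
  unfold Spec_render_columns render_columns render_columns_alt
  have hdown : PySem.List.pyRange 15 (-1) (-1) = (List.range 16).map (fun k => 15 - Int.ofNat k) := by decide
  have hup : PySem.List.pyRange 0 16 1 = (List.range 16).map Int.ofNat := by decide
  cases lsb_top
  · simp only [Bool.false_eq_true, if_false, foldl_app, List.nil_append,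
      hdown, hup, List.map_map]
    apply List.map_congr_left
    intro k hk
    simp only [List.mem_range] at hk
    simp only [Function.comp]
    congr 1
    apply List.map_congr_left
    intro c _
    simp only [Function.comp]
    rw [char_eq c on_char off_char (Int.ofNat k) (by simp only [Int.ofNat_eq_natCast]; omega) (by simp only [Int.ofNat_eq_natCast]; omega)]
  · simp only [if_true, foldl_app, List.nil_append, hdown, hup, List.map_map]
    apply List.map_congr_left
    intro k hk
    simp only [List.mem_range] at hk
    simp only [Function.comp]
    congr 1
    apply List.map_congr_left
    intro c _
    simp only [Function.comp]
    rw [char_eq c on_char off_char (15 - Int.ofNat k) (by simp only [Int.ofNat_eq_natCast]; omega) (by simp only [Int.ofNat_eq_natCast]; omega)]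
    have h2 : ((15 : Int) - (15 - Int.ofNat k)).toNat = (Int.ofNat k).toNat := by simp only [Int.ofNat_eq_natCast]; omega
    rw [h2]
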